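-- pv_equiv track=rewrite | github.com/SUOKE2024/suoke_life | scripts/ultimate_quality_optimizer.py | _sort_and_clean_imports
-- ===== SOURCE A (Python) =====
-- def _sort_and_clean_imports(content: str) -> str:
--     """排序和清理导入"""
--     lines = content.split('\n')
--
--     # 分离导入和其他代码
--     imports = []
--     other_lines = []
--     in_imports = True
--
--     for line in lines:
--         if line.strip().startswith(('import ', 'from ')) and in_imports:
--             imports.append(line)
--         elif line.strip() == '' and in_imports:
--             continue
--         else:
--             in_imports = False
--             other_lines.append(line)
--
--     # 排序导入
--     imports.sort()
--
--     # 重新组合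
--     if imports:
--         return '\n'.join(imports) + '\n\n' + '\n'.join(other_lines)
--     else:
--         return content
-- ===== SOURCE B (Python) =====
-- def _sort_and_clean_imports(content: str) -> str:
--     """Online insertion sort: keep imports sorted as they arrive; break at the
--     first real code line and keep the remainder by index."""
--     lines = content.split('\n')
--     sorted_imports = []
--     idx = len(lines)
--     for i, line in enumerate(lines):
--         s = line.strip()
--         if s.startswith('import ') or s.startswith('from '):
--             j = 0
--             while j < len(sorted_imports) and sorted_imports[j] <= line:
--                 j += 1
--             sorted_imports.insert(j, line)
--         elif s == '':
--             continue
--         else: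
--             idx = i
--             break
--     if not sorted_imports:
--         return content
--     return '\n'.join(sorted_imports) + '\n\n' + '\n'.join(lines[idx:])
-- ===== Notes on version B (the rewrite author's own statement) =====
-- stated objective: alternative
-- what changed: Replaces collect-then-library-sort with an online insertion sort: each import line is inserted into an already-sorted list as it is scanned, the loop breaks at the first code line and the tail is kept by index slice, so no separate sort pass or latching flag exists.
import Mathlib
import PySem

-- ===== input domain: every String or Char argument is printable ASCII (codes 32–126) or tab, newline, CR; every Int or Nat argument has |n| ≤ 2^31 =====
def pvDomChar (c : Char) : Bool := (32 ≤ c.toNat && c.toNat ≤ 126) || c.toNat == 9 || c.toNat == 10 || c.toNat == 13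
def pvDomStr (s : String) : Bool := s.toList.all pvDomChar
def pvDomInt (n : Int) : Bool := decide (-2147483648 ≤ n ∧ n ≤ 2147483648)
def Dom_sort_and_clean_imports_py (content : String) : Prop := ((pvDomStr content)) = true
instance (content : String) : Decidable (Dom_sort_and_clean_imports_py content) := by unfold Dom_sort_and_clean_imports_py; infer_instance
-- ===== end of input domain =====

-- B replaces A's collect-then-sort flag loop by an online insertion sort that breaks at the first code line; objective: alternative.

-- ===== PORT A =====
-- line.strip().startswith(('import ', 'from '))
def pvIsImp (l : String) : Bool :=
  PySem.Str.startswith (PySem.Str.strip l) "import " || PySem.Str.startswith (PySem.Str.strip l) "from "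

-- the body of A's for-loop over (imports, other_lines, in_imports)
def pvStepA (st : List String × List String × Bool) (line : String) : List String × List String × Bool :=
  if pvIsImp line && st.2.2 then (st.1 ++ [line], st.2.1, st.2.2)
  else if (PySem.Str.strip line == "") && st.2.2 then st
  else (st.1, st.2.1 ++ [line], false)

def sort_and_clean_imports_py (content : String) : String :=
  let lines := ((PySem.Str.split? content "\n").getD [])
  let r := lines.foldl pvStepA ([], [], true)
  let imports := PySem.List.sorted r.1 (fun x => x) false
  if imports ≠ [] then
    PySem.Str.join "\n" imports ++ "\n\n" ++ PySem.Str.join "\n" r.2.1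
  else content

-- ===== PORT B =====
-- B's inner while: insert `line` after every element ≤ it (sorted_imports stays sorted)
def pvInsertSorted (x : String) : List String → List String
  | [] => [x]
  | y :: t => if y ≤ x then y :: pvInsertSorted x t else x :: y :: t

-- B's for-loop with break: returns (sorted_imports, lines[idx:])
def pvLoopB : List String → List String → List String × List String
  | [], acc => (acc, [])
  | l :: tl, acc =>
    if pvIsImp l then pvLoopB tl (pvInsertSorted l acc)
    else if PySem.Str.strip l == "" then pvLoopB tl acc
    else (acc, l :: tl)

def sort_and_clean_imports_py_alt (content : String) : String :=
  let lines := ((PySem.Str.split? content "\n").getD [])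
  let r := pvLoopB lines []
  if r.1.isEmpty then content
  else PySem.Str.join "\n" r.1 ++ "\n\n" ++ PySem.Str.join "\n" r.2

-- ===== PRECONDITION & SPEC =====
def Spec_sort_and_clean_imports_py (content : String) (out : String) : Prop := out = sort_and_clean_imports_py_alt content
instance (content : String) (out : String) : Decidable (Spec_sort_and_clean_imports_py content out) := by unfold Spec_sort_and_clean_imports_py; infer_instance

-- ===== CLAIM =====
def Claim_equal_sort_and_clean_imports_py : Prop := ∀ (content : String), Dom_sort_and_clean_imports_py content → Spec_sort_and_clean_imports_py content (sort_and_clean_imports_py content)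

-- ===== LEMMAS AND PROOFS =====

-- 'not a boundary' predicate shared by the two characterisations (proof-only helper)
def pvKeep (l : String) : Bool := pvIsImp l || (PySem.Str.strip l == "")

-- A side: once in_imports is False, every remaining line goes to other_lines
lemma pv_foldA_false (lines imps others : List String) :
    lines.foldl pvStepA (imps, others, false) = (imps, others ++ lines, false) := by
  induction lines generalizing others with
  | nil => simp
  | cons l tl ih => simp [List.foldl_cons, pvStepA, ih]

-- A side: characterisation of the loop from the in_imports = True state
lemma pv_foldA_true (lines imps others : List String) :
    lines.foldl pvStepA (imps, others, true) =
      (imps ++ (lines.takeWhile pvKeep).filter pvIsImp,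
       others ++ lines.dropWhile pvKeep,
       lines.all pvKeep) := by
  induction lines generalizing imps with
  | nil => simp
  | cons l tl ih =>
      by_cases himp : pvIsImp l = true
      · simp [List.foldl_cons, pvStepA, himp, pvKeep, ih]
      · by_cases hblank : PySem.Str.strip l = ""
        · simp [List.foldl_cons, pvStepA, himp, hblank, pvKeep, ih]
        · simp [List.foldl_cons, pvStepA, himp, hblank, pvKeep, pv_foldA_false]

-- B side: inserting is a permutation of consing
lemma pv_ins_perm (x : String) (l : List String) : (pvInsertSorted x l).Perm (x :: l) := by
  induction l with
  | nil => simp [pvInsertSorted]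
  | cons y t ih =>
      by_cases h : y ≤ x
      · simpa [pvInsertSorted, h] using ((ih.cons y).trans (List.Perm.swap x y t))
      · simp [pvInsertSorted, h]

-- B side: inserting preserves sortedness
lemma pv_ins_pairwise (x : String) (l : List String) (h : l.Pairwise (· ≤ ·)) :
    (pvInsertSorted x l).Pairwise (· ≤ ·) := by
  induction l with
  | nil => simp [pvInsertSorted]
  | cons y t ih =>
      rcases List.pairwise_cons.mp h with ⟨hy, ht⟩
      by_cases hyx : y ≤ x
      · simp only [pvInsertSorted, if_pos hyx]
        refine List.pairwise_cons.mpr ⟨?_, ih ht⟩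
        intro z hz
        rcases List.mem_cons.mp ((pv_ins_perm x t).mem_iff.mp hz) with hz' | hzt
        · exact hz' ▸ hyx
        · exact hy z hzt
      · simp only [pvInsertSorted, if_neg hyx]
        refine List.pairwise_cons.mpr ⟨?_, h⟩
        intro z hz
        rcases List.mem_cons.mp hz with hz' | hzt
        · exact hz' ▸ le_of_lt (lt_of_not_ge hyx)
        · exact le_trans (le_of_lt (lt_of_not_ge hyx)) (hy z hzt)

-- B side: the fold of inserts is a permutation of acc ++ xs
lemma pv_fold_ins_perm (xs acc : List String) :
    (xs.foldl (fun a x => pvInsertSorted x a) acc).Perm (acc ++ xs) := by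
  induction xs generalizing acc with
  | nil => simp
  | cons x tl ih =>
      exact (ih _).trans (((pv_ins_perm x acc).append_right tl).trans
        (by simpa using (List.perm_middle (a := x) (l₁ := acc) (l₂ := tl)).symm))

-- B side: the fold of inserts stays sorted
lemma pv_fold_ins_pairwise (xs acc : List String) (h : acc.Pairwise (· ≤ ·)) :
    (xs.foldl (fun a x => pvInsertSorted x a) acc).Pairwise (· ≤ ·) := by
  induction xs generalizing acc with
  | nil => simpa using h
  | cons x tl ih => exact ih _ (pv_ins_pairwise x acc h)

-- B side: characterisation of pvLoopB
lemma pv_loopB_eq (lines acc : List String) :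
    pvLoopB lines acc =
      (((lines.takeWhile pvKeep).filter pvIsImp).foldl (fun a x => pvInsertSorted x a) acc,
       lines.dropWhile pvKeep) := by
  induction lines generalizing acc with
  | nil => simp [pvLoopB]
  | cons l tl ih =>
      by_cases himp : pvIsImp l = true
      · simp [pvLoopB, himp, pvKeep, ih]
      · by_cases hblank : PySem.Str.strip l = ""
        · simp [pvLoopB, himp, hblank, pvKeep, ih]
        · simp [pvLoopB, himp, hblank, pvKeep]

-- the two sorts agree: online insertion sort of xs = Python sorted(xs)
lemma pv_sort_eq (xs : List String) :
    PySem.List.sorted xs (fun x => x) false = xs.foldl (fun a x => pvInsertSorted x a) [] := by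
  refine PySem.List.sorted_id_eq_of_perm_of_pairwise _ _ ?_ ?_
  · simpa using pv_fold_ins_perm xs []
  · exact pv_fold_ins_pairwise xs [] (by simp)

-- ===== VERDICT =====
theorem sort_and_clean_imports_py_spec : Claim_equal_sort_and_clean_imports_py := by
  intro content _
  unfold Spec_sort_and_clean_imports_py sort_and_clean_imports_py sort_and_clean_imports_py_alt
  simp only [pv_foldA_true (((PySem.Str.split? content "\n").getD [])) [] [], List.nil_append,
    pv_loopB_eq, pv_sort_eq]
  rcases h : (((((PySem.Str.split? content "\n").getD [])).takeWhile pvKeep).filter pvIsImp).foldl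
      (fun a x => pvInsertSorted x a) [] with _ | ⟨a, t⟩
  · simp
  · simp
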